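-- pv_equiv track=rewrite | github.com/r00thunter/Semrep_Azure_DevOps_Extension | extension/tasks/semgrepScan/scripts/ticket_creator.py | _reachability_to_filters
-- ===== SOURCE A (Python) =====
-- from typing import Any, Dict, Iterable, List, Optional, Sequence, Set, Tuple
--
-- def _normalize_choice(s: str) -> str:
--     return s.strip().lower().replace(" ", "_")
--
-- def _reachability_to_filters(values: Sequence[str]) -> Tuple[List[str], List[str]]:
--     """
--     Our UI mixes reachability + transitivity in one multiSelect.
--     Map to Semgrep API query params:
--       exposures: reachable, always_reachable, conditionally_reachable, unreachable, unknown
--       transitivities: direct, transitive, unknown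
--     """
--     exposures: List[str] = []
--     transitivities: List[str] = []
--     for v in values:
--         n = _normalize_choice(v)
--         if n in ("always_reachable", "always-reachable", "alwaysreachable"):
--             exposures.append("always_reachable")
--         elif n in ("reachable",):
--             exposures.append("reachable")
--         elif n in ("conditionally_reachable", "conditionally-reachable"):
--             exposures.append("conditionally_reachable")
--         elif n in ("unreachable",):
--             exposures.append("unreachable")
--         elif n in ("unknown",):
--             exposures.append("unknown")
--         elif n in ("direct",):
--             transitivities.append("direct")
--         elif n in ("transitive",):
--             transitivities.append("transitive")
--     # de-dupe
--     exposures = sorted(set(exposures))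
--     transitivities = sorted(set(transitivities))
--     return exposures, transitivities
-- ===== SOURCE B (Python) =====
-- from typing import List, Sequence, Tuple
--
-- def _normalize_choice(s: str) -> str:
--     return s.strip().lower().replace(" ", "_")
--
-- # normalized variant -> (target list, canonical value)
-- _FILTER_TABLE = {
--     "always_reachable": ("e", "always_reachable"),
--     "always-reachable": ("e", "always_reachable"),
--     "alwaysreachable": ("e", "always_reachable"),
--     "reachable": ("e", "reachable"),
--     "conditionally_reachable": ("e", "conditionally_reachable"),
--     "conditionally-reachable": ("e", "conditionally_reachable"),
--     "unreachable": ("e", "unreachable"),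
--     "unknown": ("e", "unknown"),
--     "direct": ("t", "direct"),
--     "transitive": ("t", "transitive"),
-- }
--
-- # canonical values in sorted order
-- _EXPOSURE_ORDER = ["always_reachable", "conditionally_reachable", "reachable", "unknown", "unreachable"]
-- _TRANSITIVITY_ORDER = ["direct", "transitive"]
--
-- def _reachability_to_filters(values: Sequence[str]) -> Tuple[List[str], List[str]]:
--     seen = set()
--     for v in values:
--         hit = _FILTER_TABLE.get(_normalize_choice(v))
--         if hit is not None:
--             seen.add(hit)
--     exposures = [c for c in _EXPOSURE_ORDER if ("e", c) in seen]
--     transitivities = [c for c in _TRANSITIVITY_ORDER if ("t", c) in seen]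
--     return exposures, transitivities
-- ===== Notes on version B (the rewrite author's own statement) =====
-- stated objective: idiomatic
-- what changed: Replaces A's seven-branch if/elif chain with per-branch appends followed by sorted(set(...)) passes by a single table-driven pass that collects (target, canonical) hits into a set, then emits canonical values by membership in a fixed pre-sorted order (no sorting, no per-branch code).
import Mathlib
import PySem

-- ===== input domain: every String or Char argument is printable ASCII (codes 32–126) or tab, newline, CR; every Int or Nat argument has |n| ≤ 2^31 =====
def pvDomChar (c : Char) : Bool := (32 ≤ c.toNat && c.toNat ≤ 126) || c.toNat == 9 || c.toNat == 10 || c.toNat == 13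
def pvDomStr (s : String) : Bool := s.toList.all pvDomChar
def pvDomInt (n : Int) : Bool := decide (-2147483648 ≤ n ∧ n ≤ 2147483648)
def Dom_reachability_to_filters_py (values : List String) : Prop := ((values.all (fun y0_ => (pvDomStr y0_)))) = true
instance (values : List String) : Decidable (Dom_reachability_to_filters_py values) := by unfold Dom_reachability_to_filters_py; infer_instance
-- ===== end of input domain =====

-- B replaces A's if/elif chain and final sorted(set(...)) passes by a single table-driven
-- pass collecting hits into a set and a fixed-order membership filter (idiomatic; same cost).


-- shared helper: _normalize_choice
def normalize_choice_py (s : String) : String :=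
  PySem.Str.replace (PySem.Str.lower (PySem.Str.strip s)) " " "_"

-- ===== PORT A =====
-- loop body of A's for-loop (branch chain in A's order)
def pvStepA (st : List String × List String) (v : String) : List String × List String :=
  let n := normalize_choice_py v
  if n == "always_reachable" || n == "always-reachable" || n == "alwaysreachable" then
    (st.1 ++ ["always_reachable"], st.2)
  else if n == "reachable" then (st.1 ++ ["reachable"], st.2)
  else if n == "conditionally_reachable" || n == "conditionally-reachable" then
    (st.1 ++ ["conditionally_reachable"], st.2)
  else if n == "unreachable" then (st.1 ++ ["unreachable"], st.2)
  else if n == "unknown" then (st.1 ++ ["unknown"], st.2)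
  else if n == "direct" then (st.1, st.2 ++ ["direct"])
  else if n == "transitive" then (st.1, st.2 ++ ["transitive"])
  else st

def reachability_to_filters_py (values : List String) : List String × List String :=
  let r := values.foldl pvStepA ([], [])
  (PySem.List.sorted (PySem.Set.ofList r.1) (fun x => x) false,
   PySem.List.sorted (PySem.Set.ofList r.2) (fun x => x) false)

-- ===== PORT B =====
-- normalized variant -> (target list tag, canonical value)
def pvFilterTable : PySem.Dict String (String × String) := PySem.Dict.ofList
  [("always_reachable", ("e", "always_reachable")),
   ("always-reachable", ("e", "always_reachable")),
   ("alwaysreachable", ("e", "always_reachable")),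
   ("reachable", ("e", "reachable")),
   ("conditionally_reachable", ("e", "conditionally_reachable")),
   ("conditionally-reachable", ("e", "conditionally_reachable")),
   ("unreachable", ("e", "unreachable")),
   ("unknown", ("e", "unknown")),
   ("direct", ("t", "direct")),
   ("transitive", ("t", "transitive"))]

-- canonical values in sorted order
def pvExposureOrder : List String :=
  ["always_reachable", "conditionally_reachable", "reachable", "unknown", "unreachable"]
def pvTransitivityOrder : List String := ["direct", "transitive"]

-- loop body of B's for-loop
def pvStepB (s : PySem.Set (String × String)) (v : String) : PySem.Set (String × String) :=
  match PySem.Dict.get? pvFilterTable (normalize_choice_py v) with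
  | some hit => PySem.Set.add s hit
  | none => s

def reachability_to_filters_py_alt (values : List String) : List String × List String :=
  let seen := values.foldl pvStepB PySem.Set.empty
  (pvExposureOrder.filter (fun c => PySem.Set.contains seen ("e", c)),
   pvTransitivityOrder.filter (fun c => PySem.Set.contains seen ("t", c)))

-- ===== PRECONDITION & SPEC =====
def Spec_reachability_to_filters_py (values : List String) (out : List String × List String) : Prop := out = reachability_to_filters_py_alt values
instance (values : List String) (out : List String × List String) : Decidable (Spec_reachability_to_filters_py values out) := by unfold Spec_reachability_to_filters_py; infer_instance

-- ===== CLAIM (what is proved, stated in full; the proofs are below) =====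
def Claim_equal_reachability_to_filters_py : Prop := ∀ (values : List String), Dom_reachability_to_filters_py values → Spec_reachability_to_filters_py values (reachability_to_filters_py values)

-- ===== LEMMAS AND PROOFS =====

-- both loop bodies, characterised through one classification function
def pvClassify (n : String) : Option (Bool × String) :=
  if n == "always_reachable" || n == "always-reachable" || n == "alwaysreachable" then
    some (true, "always_reachable")
  else if n == "reachable" then some (true, "reachable")
  else if n == "conditionally_reachable" || n == "conditionally-reachable" then
    some (true, "conditionally_reachable")
  else if n == "unreachable" then some (true, "unreachable")
  else if n == "unknown" then some (true, "unknown")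
  else if n == "direct" then some (false, "direct")
  else if n == "transitive" then some (false, "transitive")
  else none

theorem pvStepA_eq (st : List String × List String) (v : String) :
    pvStepA st v = match pvClassify (normalize_choice_py v) with
      | some (true, c) => (st.1 ++ [c], st.2)
      | some (false, c) => (st.1, st.2 ++ [c])
      | none => st := by
  unfold pvStepA
  generalize normalize_choice_py v = n
  unfold pvClassify
  split_ifs <;> simp_all

set_option maxHeartbeats 1000000 in
theorem pvStepB_eq (s : PySem.Set (String × String)) (v : String) :
    pvStepB s v = match pvClassify (normalize_choice_py v) with
      | some (true, c) => PySem.Set.add s ("e", c)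
      | some (false, c) => PySem.Set.add s ("t", c)
      | none => s := by
  have htbl : pvFilterTable = PySem.Dict.mk
      [("always_reachable", ("e", "always_reachable")),
       ("always-reachable", ("e", "always_reachable")),
       ("alwaysreachable", ("e", "always_reachable")),
       ("reachable", ("e", "reachable")),
       ("conditionally_reachable", ("e", "conditionally_reachable")),
       ("conditionally-reachable", ("e", "conditionally_reachable")),
       ("unreachable", ("e", "unreachable")),
       ("unknown", ("e", "unknown")),
       ("direct", ("t", "direct")),
       ("transitive", ("t", "transitive"))] := by decide
  unfold pvStepB
  generalize normalize_choice_py v = n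
  unfold pvClassify
  rw [htbl]
  clear htbl
  simp only [PySem.Dict.get?_mk_cons]
  split_ifs <;> simp_all [PySem.Dict.get?] <;> subst_vars <;> (try simp_all [eq_comm])

theorem pvClassify_true_mem {n c : String} (h : pvClassify n = some (true, c)) :
    c ∈ pvExposureOrder := by
  unfold pvClassify at h
  split_ifs at h <;> simp_all [pvExposureOrder]

theorem pvClassify_false_mem {n c : String} (h : pvClassify n = some (false, c)) :
    c ∈ pvTransitivityOrder := by
  unfold pvClassify at h
  split_ifs at h <;> simp_all [pvTransitivityOrder]

-- loop invariant: the set built by B's loop mirrors the two lists built by A's loop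
theorem pv_fold_inv (values : List String) :
    ∀ (e t : List String) (s : PySem.Set (String × String)),
    (∀ c : String, ("e", c) ∈ s ↔ c ∈ e) →
    (∀ c : String, ("t", c) ∈ s ↔ c ∈ t) →
    (∀ c ∈ e, c ∈ pvExposureOrder) →
    (∀ c ∈ t, c ∈ pvTransitivityOrder) →
    (∀ c : String, ("e", c) ∈ values.foldl pvStepB s ↔ c ∈ (values.foldl pvStepA (e, t)).1) ∧
    (∀ c : String, ("t", c) ∈ values.foldl pvStepB s ↔ c ∈ (values.foldl pvStepA (e, t)).2) ∧
    (∀ c ∈ (values.foldl pvStepA (e, t)).1, c ∈ pvExposureOrder) ∧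
    (∀ c ∈ (values.foldl pvStepA (e, t)).2, c ∈ pvTransitivityOrder) := by
  induction values with
  | nil => intro e t s h1 h2 h3 h4; exact ⟨h1, h2, h3, h4⟩
  | cons v vs ih =>
    intro e t s h1 h2 h3 h4
    simp only [List.foldl_cons]
    rw [pvStepA_eq, pvStepB_eq]
    rcases hc : pvClassify (normalize_choice_py v) with _ | ⟨b, c⟩
    · exact ih e t s h1 h2 h3 h4
    · cases b
      · -- transitivity hit
        apply ih e (t ++ [c])
        · intro d; simp [PySem.Set.mem_add, h1 d]
        · intro d; simp [PySem.Set.mem_add, h2 d]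
        · exact h3
        · intro d hd
          rcases List.mem_append.1 hd with hd | hd
          · exact h4 d hd
          · simp at hd; subst hd; exact pvClassify_false_mem hc
      · -- exposure hit
        apply ih (e ++ [c]) t
        · intro d; simp [PySem.Set.mem_add, h1 d]
        · intro d; simp [PySem.Set.mem_add, h2 d]
        · intro d hd
          rcases List.mem_append.1 hd with hd | hd
          · exact h3 d hd
          · simp at hd; subst hd; exact pvClassify_true_mem hc
        · exact h4

theorem pvExposureOrder_pairwise : pvExposureOrder.Pairwise (· < ·) := by
  simp [pvExposureOrder, String.lt_iff_toList_lt]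
  decide

theorem pvTransitivityOrder_pairwise : pvTransitivityOrder.Pairwise (· < ·) := by
  simp [pvTransitivityOrder, String.lt_iff_toList_lt]
  decide

-- sorted(set(xs)) of a list drawn from a strictly increasing canonical list
-- is that canonical list filtered by membership
theorem pv_sorted_set_eq_filter (e order : List String)
    (hpw : order.Pairwise (· < ·)) (hnd : order.Nodup)
    (hsub : ∀ c ∈ e, c ∈ order) :
    PySem.List.sorted (PySem.Set.ofList e) (fun x => x) false
      = order.filter (fun c => decide (c ∈ e)) := by
  apply PySem.List.sorted_eq_of_perm_of_pairwise_lt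
  · rw [List.perm_ext_iff_of_nodup (hnd.filter _) (PySem.Set.nodup_ofList e)]
    intro a
    simp only [List.mem_filter, PySem.Set.mem_ofList, decide_eq_true_eq]
    exact ⟨fun h => h.2, fun h => ⟨hsub a h, h⟩⟩
  · exact hpw.sublist List.filter_sublist

-- ===== VERDICT (by name: the statement is the Claim_ definition above) =====
theorem reachability_to_filters_py_spec : Claim_equal_reachability_to_filters_py := by
  intro values _
  unfold Spec_reachability_to_filters_py reachability_to_filters_py reachability_to_filters_py_alt
  obtain ⟨h1, h2, h3, h4⟩ := pv_fold_inv values [] [] PySem.Set.empty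
    (by intro c; simp [PySem.Set.empty]) (by intro c; simp [PySem.Set.empty])
    (by intro c h; cases h) (by intro c h; cases h)
  dsimp only
  refine Prod.ext ?_ ?_
  · rw [pv_sorted_set_eq_filter _ pvExposureOrder pvExposureOrder_pairwise (by decide) h3]
    dsimp only
    apply List.filter_congr
    intro c _
    simp only [PySem.Set.contains, List.contains_eq_mem, decide_eq_decide]
    exact Iff.symm (h1 c)
  · rw [pv_sorted_set_eq_filter _ pvTransitivityOrder pvTransitivityOrder_pairwise (by decide) h4]
    dsimp only
    apply List.filter_congr
    intro c _
    simp only [PySem.Set.contains, List.contains_eq_mem, decide_eq_decide]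
    exact Iff.symm (h2 c)
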